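-- pv_equiv track=rewrite | github.com/PLKeluj/Matury | 2019/ODP/Zadanie4/Zadanie_4_1.py | czyPotega
-- ===== SOURCE A (Python) =====
-- def czyPotega(liczba, potegi):
--     l = 0
--     p = len(potegi) - 1
--
--     while l <= p:
--         s = (l + p) // 2
--         if potegi[s] == liczba:
--             return True
--         if potegi[s] < liczba:
--             l = s + 1
--         elif potegi[s] > liczba:
--             p = s - 1
--
--     return False
-- ===== SOURCE B (Python) =====
-- def czyPotega(liczba, potegi):
--     # Recursive binary search on slices: probe the same midpoint element as
--     # A's index-window loop, then recurse on the right or left half-slice.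
--     if not potegi:
--         return False
--     s = (len(potegi) - 1) // 2
--     if potegi[s] == liczba:
--         return True
--     if potegi[s] < liczba:
--         return czyPotega(liczba, potegi[s + 1:])
--     return czyPotega(liczba, potegi[:s])
-- ===== Notes on version B (the rewrite author's own statement) =====
-- stated objective: alternative
-- what changed: Replaced A's while-loop binary search over index bounds (l, p) on the full list with a recursive binary search that probes the middle element and recurses on the right/left half obtained by slicing, so no index window is maintained.
import Mathlib
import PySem

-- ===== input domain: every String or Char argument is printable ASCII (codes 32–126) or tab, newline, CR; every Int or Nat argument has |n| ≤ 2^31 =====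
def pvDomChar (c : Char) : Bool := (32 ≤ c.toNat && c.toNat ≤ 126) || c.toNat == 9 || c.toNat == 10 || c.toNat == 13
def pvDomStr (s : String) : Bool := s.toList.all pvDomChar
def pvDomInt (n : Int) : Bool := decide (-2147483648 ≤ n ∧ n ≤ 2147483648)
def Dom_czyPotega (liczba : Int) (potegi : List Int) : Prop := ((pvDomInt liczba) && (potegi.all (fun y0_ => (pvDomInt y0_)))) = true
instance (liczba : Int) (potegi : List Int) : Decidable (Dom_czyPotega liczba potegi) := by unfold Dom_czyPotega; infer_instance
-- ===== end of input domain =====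

-- B replaces A's index-window while-loop with a recursive binary search on list slices; objective: alternative decomposition (same probe sequence, not faster).

-- ===== PORT A =====
-- the while-loop over the mutable bounds l, p; the unreachable `none` branch is
-- where Python's potegi[s] would raise IndexError (never hit from czyPotega's
-- initial bounds 0, len-1)
def czyPotegaGo (liczba : Int) (potegi : List Int) (l p : Int) : Bool :=
  if _h : l ≤ p then
    match PySem.List.pyGet? potegi (PySem.Int.floordiv (l + p) 2) with
    | none => false
    | some v =>
      if v = liczba then true
      else if v < liczba then
        czyPotegaGo liczba potegi (PySem.Int.floordiv (l + p) 2 + 1) p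
      else
        czyPotegaGo liczba potegi l (PySem.Int.floordiv (l + p) 2 - 1)
  else false
termination_by (p + 1 - l).toNat
decreasing_by
  · have := (PySem.Int.floordiv_two_mid_bounds _h).1
    omega
  · have := (PySem.Int.floordiv_two_mid_bounds _h).2
    omega

def czyPotega (liczba : Int) (potegi : List Int) : Bool :=
  czyPotegaGo liczba potegi 0 ((potegi.length : Int) - 1)

-- ===== PORT B =====
-- recursive binary search on slices (Source B); again `none` marks Python's
-- unreachable IndexError branch
def czyPotega_alt (liczba : Int) (potegi : List Int) : Bool :=
  if potegi.isEmpty then false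
  else
    match _hv : PySem.List.pyGet? potegi (PySem.Int.floordiv ((potegi.length : Int) - 1) 2) with
    | none => false
    | some v =>
      if v = liczba then true
      else if v < liczba then
        czyPotega_alt liczba
          (PySem.List.slice potegi (some (PySem.Int.floordiv ((potegi.length : Int) - 1) 2 + 1)) none)
      else
        czyPotega_alt liczba
          (PySem.List.slice potegi none (some (PySem.Int.floordiv ((potegi.length : Int) - 1) 2)))
termination_by potegi.length
decreasing_by
  all_goals
    have hne : potegi ≠ [] := by intro e; subst e; simp_all
    have hlen : 1 ≤ (potegi.length : Int) := by
      have := List.length_pos_iff.mpr hne; omega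
    have hmid := PySem.Int.floordiv_two_mid_bounds
      (show (0:Int) ≤ (potegi.length : Int) - 1 by omega)
    rw [zero_add] at hmid
  · rw [show PySem.List.slice potegi
        (some (PySem.Int.floordiv ((potegi.length : Int) - 1) 2 + 1)) none =
        potegi.drop (PySem.Int.floordiv ((potegi.length : Int) - 1) 2 + 1).toNat from
        PySem.List.slice_from potegi (by omega)]
    simp only [List.length_drop]
    omega
  · rw [show PySem.List.slice potegi none
        (some (PySem.Int.floordiv ((potegi.length : Int) - 1) 2)) =
        potegi.take (PySem.Int.floordiv ((potegi.length : Int) - 1) 2).toNat from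
        PySem.List.slice_to potegi (by omega)]
    simp only [List.length_take]
    omega

-- ===== PRECONDITION & SPEC =====
def Spec_czyPotega (liczba : Int) (potegi : List Int) (out : Bool) : Prop := out = czyPotega_alt liczba potegi
instance (liczba : Int) (potegi : List Int) (out : Bool) : Decidable (Spec_czyPotega liczba potegi out) := by unfold Spec_czyPotega; infer_instance

-- ===== CLAIM (what is proved, stated in full; the proofs are below) =====
def Claim_equal_czyPotega : Prop := ∀ (liczba : Int) (potegi : List Int), Dom_czyPotega liczba potegi → Spec_czyPotega liczba potegi (czyPotega liczba potegi)

-- ===== LEMMAS AND PROOFS =====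

-- A's loop on window [l, p] equals B on the corresponding slice of the list.
theorem go_eq_alt (liczba : Int) (potegi : List Int) :
    ∀ (n : Nat) (l p : Int), (p + 1 - l).toNat ≤ n → 0 ≤ l → p < (potegi.length : Int) →
      czyPotegaGo liczba potegi l p =
        czyPotega_alt liczba ((potegi.drop l.toNat).take (p + 1 - l).toNat) := by
  intro n
  induction n with
  | zero =>
    intro l p hn hl hp
    have hlp : ¬ l ≤ p := by omega
    rw [czyPotegaGo, dif_neg hlp]
    rw [show (p + 1 - l).toNat = 0 by omega]
    rw [czyPotega_alt]
    simp
  | succ n ih =>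
    intro l p hn hl hp
    by_cases hlp : l ≤ p
    · have hmid := PySem.Int.floordiv_two_mid_bounds hlp
      have hse : PySem.Int.floordiv (l + p) 2 = (l + p) / 2 :=
        PySem.Int.floordiv_eq_ediv_of_pos (by omega)
      set s := PySem.Int.floordiv (l + p) 2 with hs
      have hsl : s.toNat < potegi.length := by omega
      have hget : PySem.List.pyGet? potegi s = some potegi[s.toNat] := by
        rw [PySem.List.pyGet?_of_nonneg potegi (by omega), List.getElem?_eq_getElem hsl]
      set w := (potegi.drop l.toNat).take (p + 1 - l).toNat with hw
      have hwlen : w.length = (p + 1 - l).toNat := by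
        rw [hw]; simp; omega
      have hwne : w.isEmpty = false := by
        rw [List.isEmpty_eq_false_iff, ← List.length_pos_iff, hwlen]; omega
      have hs' : PySem.Int.floordiv ((w.length : Int) - 1) 2 = s - l := by
        rw [hwlen, PySem.Int.floordiv_eq_ediv_of_pos (by omega),
          show (((p + 1 - l).toNat : Int)) = p + 1 - l by omega]
        omega
      have hwget : PySem.List.pyGet? w (s - l) = some potegi[s.toNat] := by
        rw [PySem.List.pyGet?_of_nonneg w (by omega), hw,
          List.getElem?_take_of_lt (by omega), List.getElem?_drop,
          show l.toNat + (s - l).toNat = s.toNat by omega,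
          List.getElem?_eq_getElem hsl]
      rw [czyPotegaGo, dif_pos hlp, ← hs, hget]
      rw [czyPotega_alt, if_neg (by rw [hwne]; simp), hs', hwget]
      by_cases hveq : potegi[s.toNat] = liczba
      · simp [hveq]
      · by_cases hvlt : potegi[s.toNat] < liczba
        · simp only [if_neg hveq, if_pos hvlt]
          rw [show PySem.List.slice w (some (s - l + 1)) none =
              w.drop (s - l + 1).toNat from PySem.List.slice_from w (by omega)]
          rw [hw, List.drop_take, List.drop_drop,
            show l.toNat + (s - l + 1).toNat = (s + 1).toNat by omega,
            show (p + 1 - l).toNat - (s - l + 1).toNat = (p + 1 - (s + 1)).toNat by omega]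
          exact ih (s + 1) p (by omega) (by omega) hp
        · simp only [if_neg hveq, if_neg hvlt]
          rw [show PySem.List.slice w none (some (s - l)) =
              w.take (s - l).toNat from PySem.List.slice_to w (by omega)]
          rw [hw, List.take_take, show min (s - l).toNat (p + 1 - l).toNat = (s - 1 + 1 - l).toNat by omega]
          exact ih l (s - 1) (by omega) hl (by omega)
    · rw [czyPotegaGo, dif_neg hlp]
      rw [show (p + 1 - l).toNat = 0 by omega]
      rw [czyPotega_alt]
      simp

-- ===== VERDICT (by name: the statement is the Claim_ definition above) =====
theorem czyPotega_spec : Claim_equal_czyPotega := by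
  intro liczba potegi _
  unfold Spec_czyPotega czyPotega
  have h := go_eq_alt liczba potegi (potegi.length + 1) 0 ((potegi.length : Int) - 1)
    (by omega) (by omega) (by omega)
  rw [h, show ((potegi.length : Int) - 1 + 1 - 0).toNat = potegi.length by omega]
  simp
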